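-- pv_equiv track=rewrite | github.com/lellingsen/AoC-2023 | 15a.py | run_hash
-- ===== SOURCE A (Python) =====
-- def run_hash(str):
--     value = 0
--
--     for character in str:
--         ascii_code = ord(character)
--         value += ascii_code
--         value *= 17
--         value %= 256
--
--     return value
-- ===== SOURCE B (Python) =====
-- def run_hash(str):
--     value = 0
--     p = 17
--     for character in reversed(str):
--         value = (value + ord(character) * p) % 256
--         p = p * 17 % 256
--     return value
-- ===== Notes on version B (the rewrite author's own statement) =====
-- stated objective: alternative
-- what changed: B evaluates the HASH as a weighted polynomial sum over the characters in reverse order, maintaining a running power of 17 mod 256, instead of A's forward Horner-style rolling (value+ord)*17 %% 256 update.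
import Mathlib
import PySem

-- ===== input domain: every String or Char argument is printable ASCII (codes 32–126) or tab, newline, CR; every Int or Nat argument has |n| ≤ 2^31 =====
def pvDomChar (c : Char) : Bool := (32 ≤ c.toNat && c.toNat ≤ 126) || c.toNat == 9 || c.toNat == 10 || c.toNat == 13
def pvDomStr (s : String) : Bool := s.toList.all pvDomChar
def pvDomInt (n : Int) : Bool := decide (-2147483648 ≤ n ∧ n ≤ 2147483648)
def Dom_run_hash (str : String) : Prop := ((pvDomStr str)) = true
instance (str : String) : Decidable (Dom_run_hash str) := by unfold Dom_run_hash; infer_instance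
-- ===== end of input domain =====

-- B computes the HASH as a reverse-order weighted sum with a running power of 17 (mod 256)
-- instead of A's forward Horner rolling update; same O(n) cost, different decomposition.

-- ===== PORT A =====
def run_hash (str : String) : Int :=
  str.toList.foldl (fun value character => ((value + (character.toNat : Int)) * 17) % 256) 0

-- ===== PORT B =====
def run_hash_alt (str : String) : Int :=
  (str.toList.reverse.foldl
    (fun (st : Int × Int) character =>
      ((st.1 + (character.toNat : Int) * st.2) % 256, st.2 * 17 % 256))
    (0, 17)).1

-- ===== PRECONDITION & SPEC =====
def Spec_run_hash (str : String) (out : Int) : Prop := out = run_hash_alt str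
instance (str : String) (out : Int) : Decidable (Spec_run_hash str out) := by unfold Spec_run_hash; infer_instance

-- ===== CLAIM (what is proved, stated in full; the proofs are below) =====
def Claim_equal_run_hash : Prop := ∀ (str : String), Dom_run_hash str → Spec_run_hash str (run_hash str)

-- ===== LEMMAS AND PROOFS =====

/-- Horner evaluation without the modulus. -/
def pvHorner (l : List Int) (v : Int) : Int := l.foldl (fun v c => (v + c) * 17) v

/-- Little-endian polynomial in 17: pvPolyR [a,b,...] = a + 17*b + ... -/
def pvPolyR (l : List Int) : Int := l.foldr (fun c acc => c + 17 * acc) 0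

def pvOrd (c : Char) : Int := (c.toNat : Int)

theorem pvModEq_emod (n a : Int) : a % n ≡ a [ZMOD n] := Int.emod_emod_of_dvd a dvd_rfl

theorem pvmodlin (n a b k : Int) : (a % n * k + b) % n = (a * k + b) % n :=
  ((pvModEq_emod n a).mul_right k).add_right b

theorem pvmodadd (n a b : Int) : (a % n + b) % n = (a + b) % n :=
  (pvModEq_emod n a).add_right b

theorem pvmodlin' (n a b k : Int) : (b + a % n * k) % n = (b + a * k) % n :=
  ((pvModEq_emod n a).mul_right k).add_left b

theorem pvHorner_shift (l : List Int) (v : Int) :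
    pvHorner l v = v * 17 ^ l.length + pvHorner l 0 := by
  induction l generalizing v with
  | nil => simp [pvHorner]
  | cons c l ih =>
    rw [show pvHorner (c :: l) v = pvHorner l ((v + c) * 17) from rfl,
      show pvHorner (c :: l) 0 = pvHorner l ((0 + c) * 17) from rfl,
      ih ((v + c) * 17), ih ((0 + c) * 17), List.length_cons]
    ring

theorem pvA_fold_eq (l : List Char) (v : Int) (hv : v % 256 = v) :
    l.foldl (fun value character => ((value + (character.toNat : Int)) * 17) % 256) v
      = pvHorner (l.map pvOrd) v % 256 := by
  induction l generalizing v with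
  | nil => simpa using hv.symm
  | cons c l ih =>
    rw [List.foldl_cons, ih _ (Int.emod_emod_of_dvd _ dvd_rfl), List.map_cons,
      show pvHorner (pvOrd c :: l.map pvOrd) v = pvHorner (l.map pvOrd) ((v + (c.toNat : Int)) * 17) from rfl,
      pvHorner_shift (l.map pvOrd) (((v + (c.toNat : Int)) * 17) % 256),
      pvHorner_shift (l.map pvOrd) ((v + (c.toNat : Int)) * 17),
      pvmodlin]

theorem pvPolyR_append (l : List Int) (c : Int) :
    pvPolyR (l ++ [c]) = pvPolyR l + c * 17 ^ l.length := by
  induction l with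
  | nil => simp [pvPolyR]
  | cons a l ih =>
    rw [List.cons_append,
      show pvPolyR (a :: (l ++ [c])) = a + 17 * pvPolyR (l ++ [c]) from rfl,
      show pvPolyR (a :: l) = a + 17 * pvPolyR l from rfl, ih, List.length_cons]
    ring

theorem pvHorner_polyR (l : List Int) (v : Int) :
    pvHorner l v = v * 17 ^ l.length + 17 * pvPolyR l.reverse := by
  induction l generalizing v with
  | nil => simp [pvHorner, pvPolyR]
  | cons c l ih =>
    rw [show pvHorner (c :: l) v = pvHorner l ((v + c) * 17) from rfl,
      ih ((v + c) * 17), List.reverse_cons, pvPolyR_append, List.length_cons,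
      List.length_reverse]
    ring

theorem pvB_fold_eq (r : List Char) (v p : Int) (hv : v % 256 = v) :
    (r.foldl (fun (st : Int × Int) character =>
        ((st.1 + (character.toNat : Int) * st.2) % 256, st.2 * 17 % 256)) (v, p)).1
      = (v + p * pvPolyR (r.map pvOrd)) % 256 := by
  induction r generalizing v p with
  | nil => simp [pvPolyR, hv]
  | cons c r ih =>
    rw [List.foldl_cons, List.map_cons,
      show pvPolyR (pvOrd c :: r.map pvOrd) = pvOrd c + 17 * pvPolyR (r.map pvOrd) from rfl]
    rw [ih ((v + (c.toNat : Int) * p) % 256) (p * 17 % 256) (Int.emod_emod_of_dvd _ dvd_rfl)]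
    rw [pvmodadd, pvmodlin' 256 (p * 17)]
    congr 1
    simp only [pvOrd]
    ring

-- ===== VERDICT (by name: the statement is the Claim_ definition above) =====
theorem run_hash_spec : Claim_equal_run_hash := by
  intro str _
  unfold Spec_run_hash run_hash run_hash_alt
  rw [pvA_fold_eq str.toList 0 (by decide), pvB_fold_eq str.toList.reverse 0 17 (by decide),
    List.map_reverse, pvHorner_polyR]
  ring_nf
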